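-- pv_equiv track=rewrite | github.com/sarimehmet6/RepoMind | repomind/context_builder.py | _top_largest_files
-- ===== SOURCE A (Python) =====
-- TOP_LARGEST_COUNT = 3
--
-- def _top_largest_files(per_file_stats: dict) -> list[tuple[str, int]]:
--     """Return top N (path, lines) by line count, tie-break by path for determinism."""
--     items = [
--         (path, stats.get("lines", 0))
--         for path, stats in per_file_stats.items()
--         if isinstance(stats, dict)
--     ]
--     items.sort(key=lambda x: (-x[1], x[0]))
--     return items[:TOP_LARGEST_COUNT]
-- ===== SOURCE B (Python) =====
-- TOP_LARGEST_COUNT = 3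
--
-- def _insert_sorted(cand, top):
--     """Insert cand into top, which is kept sorted by key (-lines, path)."""
--     if not top or (-cand[1], cand[0]) < (-top[0][1], top[0][0]):
--         return [cand] + top
--     return [top[0]] + _insert_sorted(cand, top[1:])
--
-- def _top_largest_files(per_file_stats: dict) -> list[tuple[str, int]]:
--     """Return top N (path, lines) by line count, tie-break by path for determinism."""
--     top = []
--     for path, stats in per_file_stats.items():
--         if isinstance(stats, dict):
--             top = _insert_sorted((path, stats.get("lines", 0)), top)[:TOP_LARGEST_COUNT]
--     return top
-- ===== Notes on version B (the rewrite author's own statement) =====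
-- stated objective: alternative
-- what changed: B replaces build-all/sort-all/slice by a single pass that maintains a bounded list of at most 3 entries kept sorted by the key (-lines, path), inserting each candidate in order and truncating (incremental top-k selection instead of a full sort).
import Mathlib
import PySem

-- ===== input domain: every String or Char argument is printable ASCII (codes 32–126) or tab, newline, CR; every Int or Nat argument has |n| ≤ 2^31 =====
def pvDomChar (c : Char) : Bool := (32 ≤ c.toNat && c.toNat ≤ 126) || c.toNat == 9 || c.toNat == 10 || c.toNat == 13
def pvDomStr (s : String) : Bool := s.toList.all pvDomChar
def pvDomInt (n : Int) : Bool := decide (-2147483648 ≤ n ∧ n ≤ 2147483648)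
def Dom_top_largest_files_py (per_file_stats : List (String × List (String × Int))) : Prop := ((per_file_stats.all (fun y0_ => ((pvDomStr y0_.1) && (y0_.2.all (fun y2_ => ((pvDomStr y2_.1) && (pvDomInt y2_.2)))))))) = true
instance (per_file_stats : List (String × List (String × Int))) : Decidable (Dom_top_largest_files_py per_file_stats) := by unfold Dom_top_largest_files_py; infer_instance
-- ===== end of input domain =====

-- B replaces sort-everything-then-slice by a one-pass bounded sorted insertion (top-k selection); objective: alternative.

-- ===== PORT A =====
-- TOP_LARGEST_COUNT = 3 (module constant, inlined as the literal 3).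
-- The dict arguments arrive as association lists; PySem.Dict.ofList gives Python's dict
-- construction semantics (last value wins, first position kept). The isinstance(stats, dict)
-- test is always true under the declared type dict[str, dict], so the comprehension filter
-- keeps every item.
def top_largest_files_py (per_file_stats : List (String × List (String × Int))) : List (String × Int) :=
  PySem.List.slice
    (PySem.List.sorted2
      ((PySem.Dict.ofList per_file_stats).items.map
        (fun ps => (ps.1, (PySem.Dict.ofList ps.2).getD "lines" 0)))
      (fun x => -x.2) (fun x => x.1) false)
    none (some 3)

-- ===== PORT B =====
-- Source B's _insert_sorted: insert cand into top, kept sorted by the key (-lines, path);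
-- the Python tuple comparison (-c1, c0) < (-t1, t0) is written out component-wise.
def pvInsertSorted (cand : String × Int) : List (String × Int) → List (String × Int)
  | [] => [cand]
  | t :: ts =>
    if (-cand.2 < -t.2) || ((-cand.2 : Int) = -t.2 && cand.1 < t.1) then
      cand :: t :: ts
    else
      t :: pvInsertSorted cand ts

def top_largest_files_py_alt (per_file_stats : List (String × List (String × Int))) : List (String × Int) :=
  (PySem.Dict.ofList per_file_stats).items.foldl
    (fun top ps => (pvInsertSorted (ps.1, (PySem.Dict.ofList ps.2).getD "lines" 0) top).take 3)
    []

-- ===== PRECONDITION & SPEC =====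
def Spec_top_largest_files_py (per_file_stats : List (String × List (String × Int))) (out : List (String × Int)) : Prop := out = top_largest_files_py_alt per_file_stats
instance (per_file_stats : List (String × List (String × Int))) (out : List (String × Int)) : Decidable (Spec_top_largest_files_py per_file_stats out) := by unfold Spec_top_largest_files_py; infer_instance

-- ===== CLAIM (what is proved, stated in full; the proofs are below) =====
def Claim_equal_top_largest_files_py : Prop := ∀ (per_file_stats : List (String × List (String × Int))), Dom_top_largest_files_py per_file_stats → Spec_top_largest_files_py per_file_stats (top_largest_files_py per_file_stats)

-- ===== LEMMAS AND PROOFS =====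

-- B's comparison agrees pointwise with the `before` function of sorted2 with keys (-lines, path).
theorem pvInsertSorted_eq_insertBy (cand : String × Int) (l : List (String × Int)) :
    pvInsertSorted cand l =
      PySem.List.insertBy
        (fun a b => decide ((-a.2 : Int) < -b.2) ||
          (!decide ((-b.2 : Int) < -a.2) && decide (a.1 < b.1))) cand l := by
  induction l with
  | nil => rfl
  | cons t ts ih =>
    simp only [pvInsertSorted, PySem.List.insertBy, ih]
    congr 1
    by_cases h1 : (-cand.2 : Int) < -t.2
    · simp [h1]
    · by_cases h2 : (-t.2 : Int) < -cand.2
      · simp only [h1, h2]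
        simp only [] at *
        simp
        intro he
        exact absurd he (by omega)
      · simp [(by omega : (-cand.2 : Int) = -t.2)]

-- Truncating the accumulator to k after each sorted insertion is harmless:
-- inserting into the first k elements and re-truncating equals truncating the full insertion.
theorem insertBy_take_take {α : Type} (bf : α → α → Bool) (x : α) :
    ∀ (s : List α) (k : Nat),
      (PySem.List.insertBy bf x (s.take k)).take k = (PySem.List.insertBy bf x s).take k := by
  intro s
  induction s with
  | nil => intro k; simp
  | cons a t ih =>
    intro k
    cases k with
    | zero => simp
    | succ k =>
      simp only [List.take_succ_cons, PySem.List.insertBy]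
      by_cases h : bf x a
      · simp only [h, if_pos]
        cases k with
        | zero => rfl
        | succ j => simp [List.take_take]
      · simp [h, ih]

-- The bounded-insertion fold computes the k-truncation of the full insertion fold.
theorem foldl_insert_take {α : Type} (bf : α → α → Bool) (k : Nat) :
    ∀ (l : List α) (s : List α),
      l.foldl (fun top x => (PySem.List.insertBy bf x top).take k) (s.take k) =
        (l.foldl (fun acc x => PySem.List.insertBy bf x acc) s).take k := by
  intro l
  induction l with
  | nil => intro s; rfl
  | cons x xs ih =>
    intro s
    simp only [List.foldl_cons]
    rw [insertBy_take_take, ih]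

-- ===== VERDICT (by name: the statement is the Claim_ definition above) =====
theorem top_largest_files_py_spec : Claim_equal_top_largest_files_py := by
  intro pfs _
  unfold Spec_top_largest_files_py top_largest_files_py top_largest_files_py_alt
  have hsl : ∀ (l : List (String × Int)), PySem.List.slice l none (some 3) = l.take 3 :=
    fun l => by simp [pysem]
  rw [hsl]
  unfold PySem.List.sorted2
  simp only [if_neg (by decide : ¬ (false = true))]
  symm
  have h1 :
      (PySem.Dict.ofList pfs).items.foldl
        (fun top ps => (pvInsertSorted (ps.1, (PySem.Dict.ofList ps.2).getD "lines" 0) top).take 3)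
        [] =
      (PySem.Dict.ofList pfs).items.foldl
        (fun top ps =>
          (PySem.List.insertBy
            (fun a b => decide ((-a.2 : Int) < -b.2) ||
              (!decide ((-b.2 : Int) < -a.2) && decide (a.1 < b.1)))
            (ps.1, (PySem.Dict.ofList ps.2).getD "lines" 0) top).take 3)
        [] :=
    by apply PySem.List.foldl_congr_mem; intro acc ps _; rw [pvInsertSorted_eq_insertBy]
  rw [h1, ← List.foldl_map
        (f := fun ps : String × List (String × Int) =>
          (ps.1, (PySem.Dict.ofList ps.2).getD "lines" 0))
        (g := fun top x =>
          (PySem.List.insertBy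
            (fun a b => decide ((-a.2 : Int) < -b.2) ||
              (!decide ((-b.2 : Int) < -a.2) && decide (a.1 < b.1))) x top).take 3)]
  exact foldl_insert_take _ 3 _ []
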